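-- pv_equiv track=rewrite | github.com/saisreereddy19/AI-Powered-Resume-Builder-ATS-Opt-Agent | backend/main.py | clean_enhanced_resume
-- ===== SOURCE A (Python) =====
-- def clean_enhanced_resume(res_text):
--     import re
--     unwanted_phrases = [
--         "okay, here’s a revised and enhanced version",
--         "you are a world-class resume writer",
--         "key improvements and explanations",
--         "to use this resume",
--         "••ats friendliness:••",
--         "ATS-friendly, more detailed, and using impactful wording.",
--         " enhanced version of your resume",
--         "ATS-friendly,",
--         " job description",
--         "okay, here's the enhanced resume for",
--     ]
--     lines = res_text.lower().split('\n')
--     core_start_idx = 0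
--     for idx, line in enumerate(lines):
--         if line.strip() == '':
--             continue
--         if any(phrase.lower() in line for phrase in unwanted_phrases):
--             continue
--         else:
--             core_start_idx = idx
--             break
--     orig_lines = res_text.split('\n')
--     cleaned_lines = []
--     skip_block = False
--     for line in orig_lines[core_start_idx:]:
--         if any(phrase.lower() in line.lower() for phrase in unwanted_phrases):
--             skip_block = True
--         if not skip_block and line.strip() != '':
--             cleaned_lines.append(line)
--     cleaned_text = "\n".join(cleaned_lines).strip()
--     return cleaned_text
-- ===== SOURCE B (Python) =====
-- def clean_enhanced_resume(res_text):
--     unwanted = [p.lower() for p in [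
--         "okay, here’s a revised and enhanced version",
--         "you are a world-class resume writer",
--         "key improvements and explanations",
--         "to use this resume",
--         "••ats friendliness:••",
--         "ATS-friendly, more detailed, and using impactful wording.",
--         " enhanced version of your resume",
--         "ATS-friendly,",
--         " job description",
--         "okay, here's the enhanced resume for",
--     ]]
--     out = []
--     copying = False  # False = still seeking the first kept line
--     for line in res_text.split('\n'):
--         low = line.lower()
--         if any(p in low for p in unwanted):
--             if copying:
--                 break  # first phrase line after the core starts ends the output
--             continue   # phrase lines before the core are just skipped
--         if line.strip():
--             out.append(line)
--             copying = True
--     return "\n".join(out).strip()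
-- ===== Notes on version B (the rewrite author's own statement) =====
-- stated objective: simpler
-- what changed: A's two scans (one over a lowered copy of all lines to compute core_start_idx, then a second pass from that index with a sticky skip_block flag that keeps iterating after the cut) are merged into one single streaming pass over the lines with a two-state machine (seeking/copying) that appends kept lines directly and exits early with break at the first phrase line after the core; no index arithmetic, no second lowered list, each line is lowered once.
import Mathlib
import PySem

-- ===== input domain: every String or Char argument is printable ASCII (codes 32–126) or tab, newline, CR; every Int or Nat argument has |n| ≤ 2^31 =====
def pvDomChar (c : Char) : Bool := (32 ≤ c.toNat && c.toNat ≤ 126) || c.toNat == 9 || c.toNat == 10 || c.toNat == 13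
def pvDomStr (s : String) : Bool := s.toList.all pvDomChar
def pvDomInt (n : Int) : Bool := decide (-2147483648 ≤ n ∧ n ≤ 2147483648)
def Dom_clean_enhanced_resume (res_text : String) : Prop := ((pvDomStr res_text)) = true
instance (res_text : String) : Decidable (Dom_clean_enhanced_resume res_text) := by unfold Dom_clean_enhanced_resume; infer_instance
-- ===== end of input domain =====

-- B merges A's two scans (index-finding pass over a lowered copy, then a skip-flag pass from that index) into
-- ONE streaming pass with a seek/copy state machine and an early exit; same return value (objective: simpler).

-- the unwanted-phrase literals both Pythons carry (A lowers each phrase at match time, B pre-lowers the list)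
def pvPhraseLits : List String := [
  "okay, here’s a revised and enhanced version",
  "you are a world-class resume writer",
  "key improvements and explanations",
  "to use this resume",
  "••ats friendliness:••",
  "ATS-friendly, more detailed, and using impactful wording.",
  " enhanced version of your resume",
  "ATS-friendly,",
  " job description",
  "okay, here's the enhanced resume for"]

-- ===== PORT A =====
-- any(phrase.lower() in line for phrase in unwanted_phrases)
def pvHasPhraseA (line : List Char) : Bool :=
  pvPhraseLits.any (fun p => PySem.Chars.isIn (PySem.Chars.lower p.toList) line)

-- A's first loop: enumerate with continue/continue/break; core_start_idx stays 0 if the loop never breaks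
def pvFindStartA (lines : List (List Char)) (idx : Nat) : Nat :=
  match lines with
  | [] => 0
  | l :: rest =>
    if (PySem.Chars.strip l).isEmpty then pvFindStartA rest (idx + 1)
    else if pvHasPhraseA l then pvFindStartA rest (idx + 1)
    else idx

-- A's second loop body: state = (cleaned_lines, skip_block)
def pvLoopA (st : List (List Char) × Bool) (line : List Char) : List (List Char) × Bool :=
  let skip := st.2 || pvHasPhraseA (PySem.Chars.lower line)
  (if !skip && !(PySem.Chars.strip line).isEmpty then st.1 ++ [line] else st.1, skip)

def clean_enhanced_resume (res_text : String) : String :=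
  let lines := PySem.Chars.splitOn (PySem.Chars.lower res_text.toList) ['\n']
  let core_start_idx := pvFindStartA lines 0
  let orig_lines := PySem.Chars.splitOn res_text.toList ['\n']
  -- orig_lines[core_start_idx:] with 0 ≤ core_start_idx is List.drop
  let r := (orig_lines.drop core_start_idx).foldl pvLoopA ([], false)
  String.mk (PySem.Chars.strip (PySem.Chars.join ['\n'] r.1))

-- ===== PORT B =====
-- Source B pre-lowers the phrase list once: [p.lower() for p in …]
def pvPhrasesLowB : List (List Char) := pvPhraseLits.map (fun p => PySem.Chars.lower p.toList)

def pvHasPhraseB (line : List Char) : Bool := pvPhrasesLowB.any (fun p => PySem.Chars.isIn p line)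

-- Source B's single loop: copying=False means still seeking the first kept line; a phrase line while
-- copying is `break`, before copying is `continue`; a non-blank phrase-free line is appended.
def pvGoB (copying : Bool) (lines : List (List Char)) : List (List Char) :=
  match lines with
  | [] => []
  | l :: rest =>
    let low := PySem.Chars.lower l
    if pvHasPhraseB low then
      if copying then [] else pvGoB false rest
    else if !(PySem.Chars.strip l).isEmpty then l :: pvGoB true rest
    else pvGoB copying rest

def clean_enhanced_resume_alt (res_text : String) : String :=
  let out := pvGoB false (PySem.Chars.splitOn res_text.toList ['\n'])
  String.mk (PySem.Chars.strip (PySem.Chars.join ['\n'] out))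

-- ===== PRECONDITION & SPEC =====
def Spec_clean_enhanced_resume (res_text : String) (out : String) : Prop := out = clean_enhanced_resume_alt res_text
instance (res_text : String) (out : String) : Decidable (Spec_clean_enhanced_resume res_text out) := by unfold Spec_clean_enhanced_resume; infer_instance

-- ===== CLAIM (what is proved, stated in full; the proofs are below) =====
def Claim_equal_clean_enhanced_resume : Prop := ∀ (res_text : String), Dom_clean_enhanced_resume res_text → Spec_clean_enhanced_resume res_text (clean_enhanced_resume res_text)

-- ===== LEMMAS AND PROOFS =====

theorem pvLowerChar_newline_iff (c : Char) : (PySem.Chars.lowerChar c = '\n') ↔ c = '\n' := by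
  unfold PySem.Chars.lowerChar
  by_cases h : PySem.Chars.isupper c
  · simp only [h, if_pos]
    constructor
    · intro hc
      exfalso
      have h2 : ('A' ≤ c ∧ c ≤ 'Z') := by simpa [PySem.Chars.isupper] using h
      have h65 : 65 ≤ c.toNat := by simpa [Char.le_def] using h2.1
      have h90 : c.toNat ≤ 90 := by simpa [Char.le_def] using h2.2
      have hv : Nat.isValidChar (c.toNat + 32) := Or.inl (by omega)
      have ht : (Char.ofNat (c.toNat + 32)).toNat = c.toNat + 32 := by simp [Char.ofNat, hv]
      have h10 : ('\n').toNat = 10 := by decide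
      have := congrArg Char.toNat hc
      simp only [ht, h10] at this
      omega
    · intro hc; subst hc; simp [PySem.Chars.isupper] at h
  · simp [h]

theorem pvGoLower (fuel : Nat) (l cur : List Char) (acc : List (List Char)) :
    PySem.Chars.splitOn.go ['\n'] fuel (PySem.Chars.lower l) (PySem.Chars.lower cur) (acc.map PySem.Chars.lower)
      = (PySem.Chars.splitOn.go ['\n'] fuel l cur acc).map PySem.Chars.lower := by
  induction fuel generalizing l cur acc with
  | zero => simp [PySem.Chars.splitOn.go, PySem.Chars.lower]
  | succ fuel ih =>
    cases l with
    | nil => simp [PySem.Chars.splitOn.go, PySem.Chars.lower]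
    | cons c rest =>
      have hpre : (['\n'].isPrefixOf (PySem.Chars.lowerChar c :: PySem.Chars.lower rest))
                    = (['\n'].isPrefixOf (c :: rest)) := by
        simp only [List.isPrefixOf, Bool.and_true]
        have := pvLowerChar_newline_iff c
        by_cases hc : c = '\n'
        · subst hc; simp [this.mpr rfl]
        · have : PySem.Chars.lowerChar c ≠ '\n' := fun h => hc (this.mp h)
          simp [beq_iff_eq, Ne.symm hc, Ne.symm this]
      rw [PySem.Chars.splitOn.go.eq_def, PySem.Chars.splitOn.go.eq_def]
      simp only [PySem.Chars.lower, List.map_cons] at *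
      by_cases hp : ['\n'].isPrefixOf (c :: rest)
      · simp only [hpre, hp, if_pos, List.length_cons, List.length_nil, List.drop_succ_cons,
          List.drop_zero]
        have := ih rest [] (cur.reverse :: acc)
        simpa [PySem.Chars.lower, List.map_reverse] using this
      · simp only [hpre, hp, if_neg, Bool.false_eq_true, not_false_iff]
        have := ih rest (c :: cur) acc
        simpa [PySem.Chars.lower] using this

theorem pvLower_splitOn (cs : List Char) :
    PySem.Chars.splitOn (PySem.Chars.lower cs) ['\n']
      = (PySem.Chars.splitOn cs ['\n']).map PySem.Chars.lower := by
  unfold PySem.Chars.splitOn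
  have hlen : (PySem.Chars.lower cs).length = cs.length := by simp [PySem.Chars.lower]
  rw [hlen]
  simpa using pvGoLower (cs.length + 1) cs [] []

theorem pvHasPhraseB_eq (l : List Char) : pvHasPhraseB l = pvHasPhraseA l := by
  simp only [pvHasPhraseB, pvHasPhraseA, pvPhrasesLowB, List.any_map]
  rfl

theorem pvIsspace_lowerChar (c : Char) :
    PySem.Chars.isspace (PySem.Chars.lowerChar c) = PySem.Chars.isspace c := by
  unfold PySem.Chars.lowerChar
  by_cases h : PySem.Chars.isupper c
  · have h2 : ('A' ≤ c ∧ c ≤ 'Z') := by simpa [PySem.Chars.isupper] using h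
    have h65 : 65 ≤ c.toNat := by simpa [Char.le_def] using h2.1
    have h90 : c.toNat ≤ 90 := by simpa [Char.le_def] using h2.2
    have hv : Nat.isValidChar (c.toNat + 32) := Or.inl (by omega)
    have ht : (Char.ofNat (c.toNat + 32)).toNat = c.toNat + 32 := by simp [Char.ofNat, hv]
    have hR : PySem.Chars.isspace c = false := by
      unfold PySem.Chars.isspace
      simp only [Bool.or_eq_false_iff, Bool.and_eq_false_iff, decide_eq_false_iff_not]
      omega
    have hL : PySem.Chars.isspace (Char.ofNat (c.toNat + 32)) = false := by
      unfold PySem.Chars.isspace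
      simp only [ht, Bool.or_eq_false_iff, Bool.and_eq_false_iff, decide_eq_false_iff_not]
      omega
    simp [h, hL, hR]
  · simp [h]

theorem pvStrip_lower_isEmpty (l : List Char) :
    (PySem.Chars.strip (PySem.Chars.lower l)).isEmpty = (PySem.Chars.strip l).isEmpty := by
  have hpf : (PySem.Chars.isspace ∘ PySem.Chars.lowerChar) = PySem.Chars.isspace :=
    funext pvIsspace_lowerChar
  unfold PySem.Chars.strip PySem.Chars.rstrip PySem.Chars.lstrip PySem.Chars.lower
  simp [List.dropWhile_map, ← List.map_reverse, hpf]

def pvGoodA (l : List Char) : Bool := !(PySem.Chars.strip l).isEmpty && !pvHasPhraseA l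

theorem pvFindStartA_eq (l : List (List Char)) (idx : Nat) :
    pvFindStartA l idx = match l.findIdx? pvGoodA with
                         | some j => idx + j
                         | none => 0 := by
  induction l generalizing idx with
  | nil => simp [pvFindStartA]
  | cons x xs ih =>
    simp only [List.findIdx?_cons]
    by_cases hgood : pvGoodA x
    · have h1 : ¬(PySem.Chars.strip x).isEmpty := by
        simp only [pvGoodA, Bool.and_eq_true, Bool.not_eq_true'] at hgood
        simp [hgood.1]
      have h2 : ¬pvHasPhraseA x := by
        simp only [pvGoodA, Bool.and_eq_true, Bool.not_eq_true'] at hgood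
        simp [hgood.2]
      simp [pvFindStartA, h1, h2, hgood]
    · have hstep : pvFindStartA (x :: xs) idx = pvFindStartA xs (idx + 1) := by
        simp only [pvGoodA, Bool.and_eq_true, Bool.not_eq_true'] at hgood
        by_cases h1 : (PySem.Chars.strip x).isEmpty
        · simp [pvFindStartA, h1]
        · have h2 : pvHasPhraseA x = true := by
            by_cases hh : pvHasPhraseA x
            · exact hh
            · exact absurd ⟨by simpa using h1, by simpa using hh⟩ hgood
          simp [pvFindStartA, h1, h2]
      rw [hstep, ih]
      have hg : pvGoodA x = false := by simpa using hgood
      cases hfi : xs.findIdx? pvGoodA with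
      | none => simp [hg]
      | some v =>
        simp only [hg, Bool.false_eq_true, if_neg, Option.map_some, not_false_iff]
        show idx + 1 + v = idx + (v + 1)
        omega

theorem pvLoopA_skip (l : List (List Char)) (acc : List (List Char)) :
    l.foldl pvLoopA (acc, true) = (acc, true) := by
  induction l generalizing acc with
  | nil => rfl
  | cons x xs ih => simp [List.foldl_cons, pvLoopA, ih]

theorem pvLoopA_run (l : List (List Char)) (acc : List (List Char)) :
    (l.foldl pvLoopA (acc, false)).1
      = acc ++ (l.takeWhile (fun x => !pvHasPhraseA (PySem.Chars.lower x))).filter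
                 (fun x => !(PySem.Chars.strip x).isEmpty) := by
  induction l generalizing acc with
  | nil => simp
  | cons x xs ih =>
    by_cases h : pvHasPhraseA (PySem.Chars.lower x)
    · simp [List.foldl_cons, pvLoopA, h, pvLoopA_skip, List.takeWhile_cons]
    · simp only [List.foldl_cons, pvLoopA, h, List.takeWhile_cons]
      by_cases hb : (PySem.Chars.strip x).isEmpty <;>
        simp [h, hb, ih]

theorem pvGoB_true (l : List (List Char)) :
    pvGoB true l = (l.takeWhile (fun x => !pvHasPhraseA (PySem.Chars.lower x))).filter
                     (fun x => !(PySem.Chars.strip x).isEmpty) := by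
  induction l with
  | nil => rfl
  | cons x xs ih =>
    simp only [pvGoB, pvHasPhraseB_eq, List.takeWhile_cons]
    by_cases hp : pvHasPhraseA (PySem.Chars.lower x)
    · simp [hp]
    · by_cases hb : (PySem.Chars.strip x).isEmpty <;> simp [hp, hb, ih]

theorem pvAllBad (l : List (List Char)) (h : ∀ y ∈ l, pvGoodA (PySem.Chars.lower y) = false) :
    (l.takeWhile (fun x => !pvHasPhraseA (PySem.Chars.lower x))).filter
      (fun x => !(PySem.Chars.strip x).isEmpty) = [] := by
  induction l with
  | nil => rfl
  | cons x xs ih =>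
    have hx := h x (List.mem_cons_self)
    by_cases hp : pvHasPhraseA (PySem.Chars.lower x)
    · simp [List.takeWhile_cons, hp]
    · have hb : (PySem.Chars.strip (PySem.Chars.lower x)).isEmpty = true := by
        simp only [pvGoodA, Bool.and_eq_false_iff, Bool.not_eq_false', Bool.not_eq_false] at hx
        rcases hx with hx | hx
        · exact hx
        · exact absurd hx hp
      have hb' : (PySem.Chars.strip x).isEmpty = true := by
        rw [← pvStrip_lower_isEmpty]; exact hb
      simp [List.takeWhile_cons, hp, hb', ih (fun y hy => h y (List.mem_cons_of_mem _ hy))]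

theorem pvGoB_false (l : List (List Char)) :
    pvGoB false l =
      ((l.drop (((l.map PySem.Chars.lower).findIdx? pvGoodA).getD 0)).takeWhile
          (fun x => !pvHasPhraseA (PySem.Chars.lower x))).filter
        (fun x => !(PySem.Chars.strip x).isEmpty) := by
  induction l with
  | nil => rfl
  | cons x xs ih =>
    simp only [List.map_cons, List.findIdx?_cons]
    by_cases hg : pvGoodA (PySem.Chars.lower x)
    · have hp : pvHasPhraseA (PySem.Chars.lower x) = false := by
        simp only [pvGoodA, Bool.and_eq_true, Bool.not_eq_true'] at hg
        exact hg.2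
      have hb : (PySem.Chars.strip (PySem.Chars.lower x)).isEmpty = false := by
        simp only [pvGoodA, Bool.and_eq_true, Bool.not_eq_true'] at hg
        exact hg.1
      have hb' : (PySem.Chars.strip x).isEmpty = false := by
        rw [← pvStrip_lower_isEmpty]; exact hb
      simp [pvGoB, pvHasPhraseB_eq, hp, hb', hg, List.takeWhile_cons, pvGoB_true]
    · have hstep : pvGoB false (x :: xs) = pvGoB false xs := by
        simp only [pvGoB, pvHasPhraseB_eq]
        by_cases hp : pvHasPhraseA (PySem.Chars.lower x)
        · simp [hp]
        · have hb : (PySem.Chars.strip (PySem.Chars.lower x)).isEmpty = true := by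
            cases hA : (PySem.Chars.strip (PySem.Chars.lower x)).isEmpty with
            | false => exact absurd (by simp [pvGoodA, hA, hp]) hg
            | true => rfl
          have hb' : (PySem.Chars.strip x).isEmpty = true := by
            rw [← pvStrip_lower_isEmpty]; exact hb
          simp [hp, hb']
      rw [hstep, ih]
      have hgf : pvGoodA (PySem.Chars.lower x) = false := by simpa using hg
      cases hfi : (xs.map PySem.Chars.lower).findIdx? pvGoodA with
      | some j => simp [hgf, hfi]
      | none =>
        have hxs : ∀ y ∈ xs, pvGoodA (PySem.Chars.lower y) = false := by
          intro y hy
          have := List.findIdx?_eq_none_iff.mp hfi (PySem.Chars.lower y)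
            (List.mem_map_of_mem hy)
          exact this
        have hall : ∀ y ∈ x :: xs, pvGoodA (PySem.Chars.lower y) = false := by
          intro y hy
          rcases List.mem_cons.mp hy with rfl | hy
          · exact hgf
          · exact hxs y hy
        simp [hgf, hfi, pvAllBad _ hxs, pvAllBad _ hall]

-- ===== VERDICT (by name: the statement is the Claim_ definition above) =====
theorem clean_enhanced_resume_spec : Claim_equal_clean_enhanced_resume := by
  intro res_text _
  unfold Spec_clean_enhanced_resume clean_enhanced_resume clean_enhanced_resume_alt
  simp only [pvLower_splitOn]
  set orig := PySem.Chars.splitOn res_text.toList ['\n'] with horig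
  rw [pvFindStartA_eq, pvGoB_false, pvLoopA_run]
  cases hfi : (orig.map PySem.Chars.lower).findIdx? pvGoodA <;> simp [hfi]
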